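-- pv_equiv track=rewrite | github.com/cazares/alvernia-reader | scripts/main.py | _validate_positional_query_placement
-- ===== SOURCE A (Python) =====
-- from typing import Dict, List, Optional, Tuple
--
-- def _validate_positional_query_placement(raw_argv: List[str], query_positional: str) -> Optional[str]:
--     q = str(query_positional or "").strip()
--     if not q:
--         return None
--     if not raw_argv:
--         return None
--     matches = [idx for idx, tok in enumerate(raw_argv) if str(tok) == q]
--     if not matches:
--         return None
--     last_idx = len(raw_argv) - 1
--     special_ok: set[int] = set()
--     # Preserve historic shorthand: --new "query" --off ...
--     if len(raw_argv) >= 2 and str(raw_argv[0]) == "--new":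
--         special_ok.add(1)
--     if any((idx in {0, last_idx}) or (idx in special_ok) for idx in matches):
--         return None
--     return "positional query must be first/last (or directly after --new); use --query for middle placement"
-- ===== SOURCE B (Python) =====
-- def _validate_positional_query_placement(raw_argv, query_positional):
--     q = str(query_positional or "").strip()
--     if not q:
--         return None
--     if not raw_argv:
--         return None
--     # Values occupying the allowed slots (first, last, and the slot after --new).
--     allowed_values = {str(raw_argv[0]), str(raw_argv[-1])}
--     start = 1
--     if len(raw_argv) >= 2 and str(raw_argv[0]) == "--new":
--         allowed_values.add(str(raw_argv[1]))
--         start = 2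
--     if q in allowed_values:
--         return None
--     # q is not at any allowed slot: it is misplaced iff it occurs in the middle slice.
--     if any(str(tok) == q for tok in raw_argv[start:len(raw_argv) - 1]):
--         return "positional query must be first/last (or directly after --new); use --query for middle placement"
--     return None
-- ===== Notes on version B (the rewrite author's own statement) =====
-- stated objective: alternative
-- what changed: Instead of collecting all match indices and a special_ok index set and scanning them, B builds the set of token VALUES occupying the allowed slots (first, last, post---new), returns None if q is in it, and otherwise tests q for membership in the forbidden middle slice raw_argv[start:-1] only.
import Mathlib
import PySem

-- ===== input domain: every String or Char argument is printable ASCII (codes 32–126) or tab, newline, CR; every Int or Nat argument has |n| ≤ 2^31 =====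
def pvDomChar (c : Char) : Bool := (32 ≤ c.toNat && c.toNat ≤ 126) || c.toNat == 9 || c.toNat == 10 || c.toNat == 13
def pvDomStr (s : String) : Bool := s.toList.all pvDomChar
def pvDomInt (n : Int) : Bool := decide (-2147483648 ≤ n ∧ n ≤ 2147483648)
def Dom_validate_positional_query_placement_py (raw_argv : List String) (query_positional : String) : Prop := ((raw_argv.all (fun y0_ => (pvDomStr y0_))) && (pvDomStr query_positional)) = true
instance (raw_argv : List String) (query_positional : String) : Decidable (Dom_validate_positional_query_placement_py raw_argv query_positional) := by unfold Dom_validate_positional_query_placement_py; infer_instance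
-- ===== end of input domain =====

-- B replaces A's match-index list and special_ok index set by a set of the VALUES in the allowed slots plus a membership test on the forbidden middle slice: simpler.


-- ===== PORT A =====
def validate_positional_query_placement_py (raw_argv : List String) (query_positional : String) : Option String :=
  -- q = str(query_positional or "").strip(): on a str, 'x or ""' is x when nonempty and "" when empty, so after strip it is strip(x) in both cases
  let q := PySem.Str.strip query_positional
  if q == "" then none
  else if raw_argv == [] then none
  else
    let matchIdxs := ((PySem.List.enumerate raw_argv 0).filter (fun p => p.2 == q)).map (fun p => p.1)
    if matchIdxs == [] then none
    else
      let last_idx : Int := (raw_argv.length : Int) - 1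
      let special_ok : PySem.Set Int :=
        if decide (2 ≤ raw_argv.length) && (PySem.List.pyGetD raw_argv 0 "" == "--new")
        then PySem.Set.add PySem.Set.empty 1 else PySem.Set.empty
      if matchIdxs.any (fun idx => (idx == 0 || idx == last_idx) || PySem.Set.contains special_ok idx)
      then none
      else some "positional query must be first/last (or directly after --new); use --query for middle placement"

-- ===== PORT B =====
def validate_positional_query_placement_py_alt (raw_argv : List String) (query_positional : String) : Option String :=
  let q := PySem.Str.strip query_positional
  if q == "" then none
  else if raw_argv == [] then none
  else
    -- allowed_values = {argv[0], argv[-1]}; start = 1; if --new shorthand: add argv[1], start = 2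
    let allowed0 : PySem.Set String :=
      PySem.Set.add (PySem.Set.add PySem.Set.empty (PySem.List.pyGetD raw_argv 0 "")) (PySem.List.pyGetD raw_argv (-1) "")
    let isNew := decide (2 ≤ raw_argv.length) && (PySem.List.pyGetD raw_argv 0 "" == "--new")
    let allowed_values := if isNew then PySem.Set.add allowed0 (PySem.List.pyGetD raw_argv 1 "") else allowed0
    let start : Int := if isNew then 2 else 1
    if PySem.Set.contains allowed_values q then none
    else if (PySem.List.slice raw_argv (some start) (some ((raw_argv.length : Int) - 1))).any (fun tok => tok == q)
    then some "positional query must be first/last (or directly after --new); use --query for middle placement"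
    else none

-- ===== PRECONDITION & SPEC =====
def Spec_validate_positional_query_placement_py (raw_argv : List String) (query_positional : String) (out : Option String) : Prop := out = validate_positional_query_placement_py_alt raw_argv query_positional
instance (raw_argv : List String) (query_positional : String) (out : Option String) : Decidable (Spec_validate_positional_query_placement_py raw_argv query_positional out) := by unfold Spec_validate_positional_query_placement_py; infer_instance

-- ===== CLAIM (what is proved, stated in full; the proofs are below) =====
def Claim_equal_validate_positional_query_placement_py : Prop := ∀ (raw_argv : List String) (query_positional : String), Dom_validate_positional_query_placement_py raw_argv query_positional → Spec_validate_positional_query_placement_py raw_argv query_positional (validate_positional_query_placement_py raw_argv query_positional)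

-- ===== LEMMAS AND PROOFS =====

-- A's any-over-match-indices condition, rewritten as the three direct slot probes.
theorem vp_core (xs : List String) (q : String) (hx : xs ≠ []) :
    ((((PySem.List.enumerate xs 0).filter (fun p => p.2 == q)).map (fun p => p.1)).any
      (fun idx => (idx == 0 || idx == ((xs.length : Int) - 1)) ||
        PySem.Set.contains (if decide (2 ≤ xs.length) && (PySem.List.pyGetD xs 0 "" == "--new")
          then PySem.Set.add PySem.Set.empty 1 else PySem.Set.empty) idx)) =
    (((PySem.List.pyGetD xs 0 "" == q) || (PySem.List.pyGetD xs (-1) "" == q)) ||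
     (decide (2 ≤ xs.length) && (PySem.List.pyGetD xs 0 "" == "--new") && (PySem.List.pyGetD xs 1 "" == q))) := by
  have hlen : 0 < xs.length := List.length_pos_iff.mpr hx
  have h0 : PySem.List.pyGetD xs 0 "" = xs[0] := by
    rw [PySem.List.pyGetD_ofNat' xs 0 ""]; exact List.getD_eq_getElem xs "" hlen
  have hneg : PySem.List.pyGetD xs (-1) "" = xs[xs.length - 1] := by
    rw [PySem.List.pyGetD_neg_ofNat xs 1 "" (by omega) (by omega)]
  rw [Bool.eq_iff_iff]
  by_cases hc : (decide (2 ≤ xs.length) && (PySem.List.pyGetD xs 0 "" == "--new")) = true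
  · rw [if_pos hc]
    simp only [Bool.and_eq_true, decide_eq_true_eq, beq_iff_eq] at hc
    obtain ⟨h2, hnew⟩ := hc
    rw [h0] at hnew
    have h1g : PySem.List.pyGetD xs 1 "" = xs[1] := by
      rw [PySem.List.pyGetD_ofNat' xs 1 ""]; exact List.getD_eq_getElem xs "" (by omega)
    simp only [List.any_eq_true, List.mem_map, List.mem_filter,
      PySem.List.mem_enumerate_iff, PySem.Set.contains, PySem.Set.add, PySem.Set.empty,
      List.contains_nil, Bool.false_eq_true, if_false, List.nil_append, List.contains_cons,
      Bool.or_eq_true, Bool.and_eq_true, beq_iff_eq, decide_eq_true_eq, or_false, h0, hneg,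
      h1g, zero_add]
    constructor
    · rintro ⟨idx, ⟨a, ⟨⟨k, hk, rfl⟩, haq⟩, rfl⟩, hcond⟩
      simp only at haq hcond
      rcases hcond with (hk0 | hklast) | hk1
      · have : k = 0 := by exact_mod_cast hk0
        subst this; exact Or.inl (Or.inl haq)
      · have : k = xs.length - 1 := by omega
        subst this; exact Or.inl (Or.inr haq)
      · have : k = 1 := by exact_mod_cast hk1
        subst this; exact Or.inr ⟨⟨h2, hnew⟩, haq⟩
    · rintro ((hq0 | hql) | ⟨-, hq1⟩)
      · exact ⟨0, ⟨((0:Nat), xs[0]), ⟨⟨0, hlen, rfl⟩, hq0⟩, rfl⟩, Or.inl (Or.inl (by simp))⟩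
      · refine ⟨(xs.length : Int) - 1, ⟨(((xs.length - 1 : Nat) : Int), xs[xs.length - 1]),
          ⟨⟨xs.length - 1, by omega, by simp⟩, hql⟩, by simp; omega⟩, Or.inl (Or.inr rfl)⟩
      · exact ⟨1, ⟨((1:Nat), xs[1]), ⟨⟨1, by omega, rfl⟩, hq1⟩, rfl⟩, Or.inr (by simp)⟩
  · rw [if_neg hc]
    replace hc : (decide (2 ≤ xs.length) && (xs[0] == "--new")) = false := by
      rw [h0] at hc; simpa using hc
    simp only [List.any_eq_true, List.mem_map, List.mem_filter,
      PySem.List.mem_enumerate_iff, PySem.Set.contains, PySem.Set.empty,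
      List.contains_nil, Bool.false_eq_true, or_false, Bool.or_eq_true, beq_iff_eq,
      h0, hneg, zero_add, hc, Bool.false_and]
    constructor
    · rintro ⟨idx, ⟨a, ⟨⟨k, hk, rfl⟩, haq⟩, rfl⟩, hcond⟩
      simp only at haq hcond
      rcases hcond with hk0 | hklast
      · have : k = 0 := by exact_mod_cast hk0
        subst this; exact Or.inl haq
      · have : k = xs.length - 1 := by omega
        subst this; exact Or.inr haq
    · rintro (hq0 | hql)
      · exact ⟨0, ⟨((0:Nat), xs[0]), ⟨⟨0, hlen, rfl⟩, hq0⟩, rfl⟩, Or.inl (by simp)⟩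
      · refine ⟨(xs.length : Int) - 1, ⟨(((xs.length - 1 : Nat) : Int), xs[xs.length - 1]),
          ⟨⟨xs.length - 1, by omega, by simp⟩, hql⟩, by simp; omega⟩, Or.inr rfl⟩

-- A's "no match at all" test, as a property of the raw list.
theorem vp_empty_iff (xs : List String) (q : String) :
    ((((PySem.List.enumerate xs 0).filter (fun p => p.2 == q)).map (fun p => p.1)) == []) =
    xs.all (fun tok => tok != q) := by
  rw [Bool.eq_iff_iff]
  simp only [beq_iff_eq, List.map_eq_nil_iff, List.filter_eq_nil_iff,
    PySem.List.mem_enumerate_iff, List.all_eq_true, bne_iff_ne, ne_eq, beq_iff_eq]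
  constructor
  · intro h tok htok
    rcases List.mem_iff_getElem.mp htok with ⟨k, hk, rfl⟩
    intro hq
    exact (h (0 + k, xs[k]) ⟨k, hk, rfl⟩) (by simpa using hq)
  · rintro h p ⟨k, hk, rfl⟩ hpq
    exact h xs[k] (List.getElem_mem hk) (by simpa using hpq)

-- B's set of allowed-slot values, as the three direct slot probes.
theorem vp_allowed (xs : List String) (q : String) :
    (PySem.Set.contains
      (if decide (2 ≤ xs.length) && (PySem.List.pyGetD xs 0 "" == "--new")
       then PySem.Set.add (PySem.Set.add (PySem.Set.add PySem.Set.empty (PySem.List.pyGetD xs 0 "")) (PySem.List.pyGetD xs (-1) "")) (PySem.List.pyGetD xs 1 "")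
       else PySem.Set.add (PySem.Set.add PySem.Set.empty (PySem.List.pyGetD xs 0 "")) (PySem.List.pyGetD xs (-1) "")) q) =
    (((PySem.List.pyGetD xs 0 "" == q) || (PySem.List.pyGetD xs (-1) "" == q)) ||
     (decide (2 ≤ xs.length) && (PySem.List.pyGetD xs 0 "" == "--new") && (PySem.List.pyGetD xs 1 "" == q))) := by
  by_cases hc : (decide (2 ≤ xs.length) && (PySem.List.pyGetD xs 0 "" == "--new")) = true
  · rw [if_pos hc, Bool.eq_iff_iff, PySem.Set.contains_iff, hc, Bool.true_and]
    simp only [PySem.Set.mem_add, PySem.Set.empty, List.not_mem_nil, false_or,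
      Bool.or_eq_true, beq_iff_eq]
    constructor
    · rintro ((h | h) | h)
      · exact Or.inl (Or.inl h.symm)
      · exact Or.inl (Or.inr h.symm)
      · exact Or.inr h.symm
    · rintro ((h | h) | h)
      · exact Or.inl (Or.inl h.symm)
      · exact Or.inl (Or.inr h.symm)
      · exact Or.inr h.symm
  · simp only [Bool.not_eq_true] at hc
    rw [if_neg (by simp [hc]), Bool.eq_iff_iff, PySem.Set.contains_iff, hc, Bool.false_and,
      Bool.or_false]
    simp only [PySem.Set.mem_add, PySem.Set.empty, List.not_mem_nil, false_or,
      Bool.or_eq_true, beq_iff_eq]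
    constructor
    · rintro (h | h)
      · exact Or.inl h.symm
      · exact Or.inr h.symm
    · rintro (h | h)
      · exact Or.inl h.symm
      · exact Or.inr h.symm

-- Under "q not at any allowed slot", q occurs in xs iff it occurs in the middle slice.
theorem vp_slice_iff (xs : List String) (q : String) (s : Nat) (hx : xs ≠ [])
    (hlow : ∀ k (hk : k < xs.length), k < s → xs[k] ≠ q)
    (hlast : xs[xs.length - 1]'(by have := List.length_pos_iff.mpr hx; omega) ≠ q) :
    (((xs.drop s).take (xs.length - 1 - s)).any (fun tok => tok == q)) =
    !(xs.all (fun tok => tok != q)) := by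
  rw [Bool.eq_iff_iff]
  simp only [List.any_eq_true, Bool.not_eq_eq_eq_not, Bool.not_true, List.all_eq_false,
    bne_iff_ne, ne_eq, not_not, beq_iff_eq]
  constructor
  · rintro ⟨tok, htok, rfl⟩
    exact ⟨tok, List.mem_of_mem_drop (List.mem_of_mem_take htok), rfl⟩
  · rintro ⟨tok, htok, rfl⟩
    rcases List.mem_iff_getElem.mp htok with ⟨j, hj, hjq⟩
    have hjs : s ≤ j := by
      by_contra hlt
      exact hlow j hj (by omega) hjq
    have hjlast : j ≠ xs.length - 1 := by
      intro h; subst h; exact hlast hjq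
    refine ⟨xs[j], List.mem_iff_getElem.mpr ⟨j - s, ?_, ?_⟩, hjq⟩
    · simp only [List.length_take, List.length_drop]; omega
    · rw [List.getElem_take, List.getElem_drop]
      congr 1; omega

-- ===== VERDICT (by name: the statement is the Claim_ definition above) =====
theorem validate_positional_query_placement_py_spec : Claim_equal_validate_positional_query_placement_py := by
  intro raw_argv query_positional _
  unfold Spec_validate_positional_query_placement_py
  unfold validate_positional_query_placement_py validate_positional_query_placement_py_alt
  by_cases h1 : (PySem.Str.strip query_positional == "") = true
  · simp only [h1, if_true]
  · simp only [Bool.not_eq_true] at h1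
    simp only [h1, Bool.false_eq_true, if_false]
    by_cases h2 : (raw_argv == []) = true
    · simp only [h2, if_true]
    · simp only [Bool.not_eq_true] at h2
      simp only [h2, Bool.false_eq_true, if_false]
      have hx : raw_argv ≠ [] := by simpa using h2
      have hlen : 0 < raw_argv.length := List.length_pos_iff.mpr hx
      set q := PySem.Str.strip query_positional with hqdef
      rw [vp_empty_iff raw_argv q, vp_core raw_argv q hx, vp_allowed raw_argv q]
      have h0 : PySem.List.pyGetD raw_argv 0 "" = raw_argv[0] := by
        rw [PySem.List.pyGetD_ofNat' raw_argv 0 ""]; exact List.getD_eq_getElem raw_argv "" hlen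
      have hneg : PySem.List.pyGetD raw_argv (-1) "" = raw_argv[raw_argv.length - 1] := by
        rw [PySem.List.pyGetD_neg_ofNat raw_argv 1 "" (by omega) (by omega)]
      by_cases hcond : (((PySem.List.pyGetD raw_argv 0 "" == q) || (PySem.List.pyGetD raw_argv (-1) "" == q)) ||
          (decide (2 ≤ raw_argv.length) && (PySem.List.pyGetD raw_argv 0 "" == "--new") && (PySem.List.pyGetD raw_argv 1 "" == q))) = true
      · simp only [hcond, if_true]
        by_cases hall : raw_argv.all (fun tok => tok != q) = true
        · simp only [hall, if_true]
        · simp only [Bool.not_eq_true] at hall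
          simp only [hall, Bool.false_eq_true, if_false]
      · simp only [Bool.not_eq_true] at hcond
        simp only [hcond, Bool.false_eq_true, if_false]
        by_cases hnew : (decide (2 ≤ raw_argv.length) && (PySem.List.pyGetD raw_argv 0 "" == "--new")) = true
        · simp only [hnew, if_true]
          have h2le : 2 ≤ raw_argv.length := by
            simp only [Bool.and_eq_true, decide_eq_true_eq] at hnew; exact hnew.1
          have h1g : PySem.List.pyGetD raw_argv 1 "" = raw_argv[1] := by
            rw [PySem.List.pyGetD_ofNat' raw_argv 1 ""]; exact List.getD_eq_getElem raw_argv "" (by omega)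
          rw [hnew, Bool.true_and] at hcond
          simp only [Bool.or_eq_false_iff, beq_eq_false_iff_ne, ne_eq, h0, hneg, h1g] at hcond
          obtain ⟨⟨hq0, hql⟩, hq1⟩ := hcond
          have hsl : PySem.List.slice raw_argv (some (2:Int)) (some ((raw_argv.length : Int) - 1)) =
              (raw_argv.drop 2).take (raw_argv.length - 1 - 2) := by
            have hcast : ((raw_argv.length : Int) - 1) = ((raw_argv.length - 1 : Nat) : Int) := by omega
            have h2c : ((2:Int)) = ((2:Nat) : Int) := by norm_num
            rw [hcast, h2c, PySem.List.slice_natCast]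
          rw [hsl, vp_slice_iff raw_argv q 2 hx ?_ hql]
          · by_cases hall : raw_argv.all (fun tok => tok != q) = true
            · simp [hall]
            · simp only [Bool.not_eq_true] at hall; simp [hall]
          · intro k hk hk2
            interval_cases k
            · exact hq0
            · exact hq1
        · simp only [Bool.not_eq_true] at hnew
          simp only [hnew, Bool.false_eq_true, if_false]
          rw [hnew, Bool.false_and, Bool.or_false] at hcond
          simp only [Bool.or_eq_false_iff, beq_eq_false_iff_ne, ne_eq, h0, hneg] at hcond
          obtain ⟨hq0, hql⟩ := hcond
          have hsl : PySem.List.slice raw_argv (some (1:Int)) (some ((raw_argv.length : Int) - 1)) =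
              (raw_argv.drop 1).take (raw_argv.length - 1 - 1) := by
            have hcast : ((raw_argv.length : Int) - 1) = ((raw_argv.length - 1 : Nat) : Int) := by omega
            have h1c : ((1:Int)) = ((1:Nat) : Int) := by norm_num
            rw [hcast, h1c, PySem.List.slice_natCast]
          rw [hsl, vp_slice_iff raw_argv q 1 hx ?_ hql]
          · by_cases hall : raw_argv.all (fun tok => tok != q) = true
            · simp [hall]
            · simp only [Bool.not_eq_true] at hall; simp [hall]
          · intro k hk hk1
            interval_cases k
            exact hq0
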